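-- pv_equiv track=rewrite | github.com/KEN513507/ver2.0_CSharp_Python_OCRClipboard | tests/scripts/test_ocr_accuracy.py | _closest_extension
-- ===== SOURCE A (Python) =====
-- def _closest_extension(ext: str, candidates=None) -> str:
--     """拡張子をレーベンシュタイン距離1以内で補正"""
--     if candidates is None:
--         candidates = ["txt", "md", "docx", "pptx", "jpg", "png", "pdf"]
--
--     ext = ext.lower()
--     if ext in candidates:
--         return ext
--
--     # 距離1以内の候補を探す（簡易実装: 1文字差分）
--     for cand in candidates:
--         if abs(len(ext) - len(cand)) > 1:
--             continue
--         # 1文字違い、1文字挿入、1文字削除のチェック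
--         if len(ext) == len(cand):
--             diff = sum(1 for a, b in zip(ext, cand) if a != b)
--             if diff <= 1:
--                 return cand
--         elif len(ext) == len(cand) + 1:
--             # ext から1文字削除で cand になる
--             for i in range(len(ext)):
--                 if ext[:i] + ext[i+1:] == cand:
--                     return cand
--         elif len(ext) == len(cand) - 1:
--             # cand から1文字削除で ext になる
--             for i in range(len(cand)):
--                 if cand[:i] + cand[i+1:] == ext:
--                     return cand
--
--     return ext  # 補正できなければそのまま
-- ===== SOURCE B (Python) =====
-- def _one_edit(s: str, t: str) -> bool:
--     """Edit distance <= 1: advance past the common prefix, then compare the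
--     three possible suffix pairs (substitution / deletion from either side)."""
--     n, m = len(s), len(t)
--     if n - m > 1 or m - n > 1:
--         return False
--     i = 0
--     while i < n and i < m and s[i] == t[i]:
--         i += 1
--     if i == n:
--         return m - n <= 1
--     if i == m:
--         return n - m <= 1
--     return s[i+1:] == t[i+1:] or s[i+1:] == t[i:] or s[i:] == t[i+1:]
--
--
-- def _closest_extension(ext: str, candidates=None) -> str:
--     if candidates is None:
--         candidates = ["txt", "md", "docx", "pptx", "jpg", "png", "pdf"]
--     ext = ext.lower()
--     if ext in candidates:
--         return ext
--     for cand in candidates: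
--         if _one_edit(ext, cand):
--             return cand
--     return ext
-- ===== Notes on version B (the rewrite author's own statement) =====
-- stated objective: simpler
-- what changed: Replaced A's three explicit length-case branches (Hamming count plus two quadratic delete-one-character scans) with a single generic one-edit check: scan both strings past their common prefix, then compare the three possible suffix pairs.
import Mathlib
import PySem

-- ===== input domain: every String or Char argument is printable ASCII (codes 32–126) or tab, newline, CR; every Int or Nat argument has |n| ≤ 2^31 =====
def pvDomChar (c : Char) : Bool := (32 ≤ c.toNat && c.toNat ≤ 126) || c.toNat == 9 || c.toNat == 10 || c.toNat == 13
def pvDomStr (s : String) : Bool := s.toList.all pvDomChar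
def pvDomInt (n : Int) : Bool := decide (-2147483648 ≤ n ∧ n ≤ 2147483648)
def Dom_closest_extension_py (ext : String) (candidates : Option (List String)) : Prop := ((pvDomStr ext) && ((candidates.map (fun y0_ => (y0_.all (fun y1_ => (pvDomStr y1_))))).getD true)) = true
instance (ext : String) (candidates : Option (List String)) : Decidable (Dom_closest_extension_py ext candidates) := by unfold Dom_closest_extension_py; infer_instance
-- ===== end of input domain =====

-- B replaces A's three length-case branches by one generic edit-distance-≤1 check (length pre-check, then a common-prefix scan); objective: simpler.

-- ===== PORT A =====
-- loop-body decision of A's `for cand in candidates` loop (branches in Python order).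
-- ext[:i] + ext[i+1:] is ported as take i ++ drop (i+1), exact for 0 ≤ i < len.
def acceptA (e c : List Char) : Bool :=
  if ((e.length : Int) - (c.length : Int)).natAbs > 1 then false
  else if e.length = c.length then
    decide ((e.zip c).countP (fun p => p.1 ≠ p.2) ≤ 1)
  else if e.length = c.length + 1 then
    (List.range e.length).any (fun i => e.take i ++ e.drop (i+1) == c)
  else if (e.length : Int) = (c.length : Int) - 1 then
    (List.range c.length).any (fun i => c.take i ++ c.drop (i+1) == e)
  else false

def loopA (e : String) : List String → String
  | [] => e
  | c :: rest => if acceptA e.toList c.toList then c else loopA e rest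

def closest_extension_py (ext : String) (candidates : Option (List String)) : String :=
  let cands := candidates.getD ["txt", "md", "docx", "pptx", "jpg", "png", "pdf"]
  let e := PySem.Str.lower ext
  if cands.contains e then e else loopA e cands

-- ===== PORT B =====
def oneEdit : List Char → List Char → Bool
  | [], t => t.length ≤ 1
  | s, [] => s.length ≤ 1
  | a :: s', b :: t' =>
    if a = b then oneEdit s' t'
    else (s' == t' || s' == (b :: t') || (a :: s') == t')

-- _one_edit's O(1) length pre-check, then the common-prefix scan (oneEdit)
def oneEditB (s t : List Char) : Bool :=
  if ((s.length : Int) - (t.length : Int)).natAbs > 1 then false else oneEdit s t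

def loopB (e : String) : List String → String
  | [] => e
  | c :: rest => if oneEditB e.toList c.toList then c else loopB e rest

def closest_extension_py_alt (ext : String) (candidates : Option (List String)) : String :=
  let cands := candidates.getD ["txt", "md", "docx", "pptx", "jpg", "png", "pdf"]
  let e := PySem.Str.lower ext
  if cands.contains e then e else loopB e cands

-- ===== PRECONDITION & SPEC =====
def Spec_closest_extension_py (ext : String) (candidates : Option (List String)) (out : String) : Prop := out = closest_extension_py_alt ext candidates
instance (ext : String) (candidates : Option (List String)) (out : String) : Decidable (Spec_closest_extension_py ext candidates out) := by unfold Spec_closest_extension_py; infer_instance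

-- ===== CLAIM (what is proved, stated in full; the proofs are below) =====
def Claim_equal_closest_extension_py : Prop := ∀ (ext : String) (candidates : Option (List String)), Dom_closest_extension_py ext candidates → Spec_closest_extension_py ext candidates (closest_extension_py ext candidates)

-- ===== LEMMAS AND PROOFS =====

-- a list zipped with itself has no unequal pair
theorem countP_zip_self : ∀ (l : List Char),
    (l.zip l).countP (fun p => p.1 ≠ p.2) = 0 := by
  intro l
  induction l with
  | nil => simp
  | cons a l' ih =>
    rw [List.zip_cons_cons, List.countP_cons, ih]
    simp

-- equal-length lists with no unequal zipped pair are equal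
theorem eq_of_countP_zip_zero : ∀ (s t : List Char), s.length = t.length →
    (s.zip t).countP (fun p => p.1 ≠ p.2) = 0 → s = t := by
  intro s
  induction s with
  | nil => intro t h _; cases t <;> simp_all
  | cons a s' ih =>
    intro t h hz
    cases t with
    | nil => simp at h
    | cons b t' =>
      simp only [List.length_cons, Nat.add_right_cancel_iff] at h
      simp only [List.zip_cons_cons, List.countP_cons] at hz
      by_cases hab : a = b
      · simp only [hab, ne_eq, not_true_eq_false, decide_false, Bool.false_eq_true,
          if_false, Nat.add_zero] at hz
        rw [hab, ih t' h hz]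
      · simp [hab] at hz

-- equal lengths: oneEdit ↔ Hamming distance ≤ 1 (A's first branch)
theorem oneEdit_eq_length : ∀ (s t : List Char), s.length = t.length →
    oneEdit s t = decide ((s.zip t).countP (fun p => p.1 ≠ p.2) ≤ 1) := by
  intro s
  induction s with
  | nil => intro t h; cases t <;> simp_all [oneEdit]
  | cons a s' ih =>
    intro t h
    cases t with
    | nil => simp at h
    | cons b t' =>
      simp only [List.length_cons, Nat.add_right_cancel_iff] at h
      rw [Bool.eq_iff_iff, decide_eq_true_eq]
      simp only [oneEdit, List.zip_cons_cons, List.countP_cons]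
      by_cases hab : a = b
      · rw [if_pos hab, ih t' h]
        simp [hab]
      · rw [if_neg hab]
        have hcnt : (if (fun p : Char × Char => decide (p.1 ≠ p.2)) (a, b) = true then 1 else 0) = 1 := by
          simp [hab]
        rw [hcnt]
        constructor
        · intro hz
          simp only [Bool.or_eq_true, beq_iff_eq] at hz
          rcases hz with (hz | hz) | hz
          · rw [hz, countP_zip_self]
          · exfalso; have := congrArg List.length hz; simp at this; omega
          · exfalso; have := congrArg List.length hz; simp at this; omega
        · intro hz
          have h0 : (s'.zip t').countP (fun p => p.1 ≠ p.2) = 0 := by omega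
          have := eq_of_countP_zip_zero s' t' h h0
          simp [this]

-- s one longer than t: oneEdit ↔ some one-character deletion of s equals t (A's second branch)
theorem oneEdit_eq_del : ∀ (s t : List Char), s.length = t.length + 1 →
    oneEdit s t = (List.range s.length).any (fun i => s.take i ++ s.drop (i+1) == t) := by
  intro s
  induction s with
  | nil => intro t h; simp at h
  | cons a s' ih =>
    intro t h
    simp only [List.length_cons, Nat.add_right_cancel_iff] at h
    cases t with
    | nil =>
      have hs' : s' = [] := List.length_eq_zero_iff.mp h
      subst hs'
      simp [oneEdit, List.range_succ]
    | cons b t' =>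
      simp only [List.length_cons] at h
      have hrange : ((List.range (a :: s').length).any
          (fun i => (a :: s').take i ++ (a :: s').drop (i+1) == (b :: t')))
          = ((s' == (b :: t')) ||
             ((List.range s'.length).any (fun j => ((a == b) && (s'.take j ++ s'.drop (j+1) == t'))))) := by
        simp only [List.length_cons, List.range_succ_eq_map, List.any_cons, List.any_map]
        congr 1
      rw [hrange]
      simp only [oneEdit]
      by_cases hab : a = b
      · rw [if_pos hab, ih t' h]
        have hb : (a == b) = true := by simp [hab]
        simp only [hb, Bool.true_and]
        by_cases hd : s' = b :: t'
        · subst hd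
          have h1 : ((List.range (b :: t').length).any
              (fun i => (b :: t').take i ++ (b :: t').drop (i+1) == t')) = true := by
            rw [List.any_eq_true]
            exact ⟨0, by simp, by simp⟩
          rw [h1]
          simp
        · have h1 : (s' == b :: t') = false := by simp [hd]
          rw [h1, Bool.false_or]
      · rw [if_neg hab]
        have hb : (a == b) = false := by simp [hab]
        have h1 : ((a :: s') == t') = false := by
          simp only [beq_eq_false_iff_ne]; intro he
          have := congrArg List.length he; simp at this; omega
        have h2 : (s' == t') = false := by
          simp only [beq_eq_false_iff_ne]; intro he
          have := congrArg List.length he; simp at this; omega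
        simp [h1, h2, hb]

-- oneEdit is symmetric
theorem oneEdit_comm : ∀ (s t : List Char), oneEdit s t = oneEdit t s := by
  intro s
  induction s with
  | nil => intro t; cases t <;> simp [oneEdit]
  | cons a s' ih =>
    intro t
    cases t with
    | nil => simp [oneEdit]
    | cons b t' =>
      simp only [oneEdit]
      by_cases hab : a = b
      · rw [if_pos hab, if_pos hab.symm, ih t']
      · rw [if_neg hab, if_neg (Ne.symm hab)]
        rw [BEq.comm (a := s') (b := t'), BEq.comm (a := s') (b := b :: t'),
          BEq.comm (a := a :: s') (b := t')]
        rw [Bool.or_comm (t' == s'), Bool.or_assoc, Bool.or_comm ((b :: t') == s')]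

-- the loop-body decisions agree
theorem acceptA_eq_oneEditB (e c : List Char) : acceptA e c = oneEditB e c := by
  unfold acceptA oneEditB
  by_cases hfar : ((e.length : Int) - (c.length : Int)).natAbs > 1
  · rw [if_pos hfar, if_pos hfar]
  · rw [if_neg hfar, if_neg hfar]
    by_cases heq : e.length = c.length
    · rw [if_pos heq, oneEdit_eq_length e c heq]
    · rw [if_neg heq]
      by_cases hgt : e.length = c.length + 1
      · rw [if_pos hgt, oneEdit_eq_del e c hgt]
      · rw [if_neg hgt]
        have hlt : (e.length : Int) = (c.length : Int) - 1 := by omega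
        rw [if_pos hlt, oneEdit_comm]
        exact (oneEdit_eq_del c e (by omega)).symm

theorem loopA_eq_loopB (e : String) : ∀ cs : List String, loopA e cs = loopB e cs := by
  intro cs
  induction cs with
  | nil => rfl
  | cons c rest ih =>
    simp only [loopA, loopB, acceptA_eq_oneEditB, ih]

-- ===== VERDICT (by name: the statement is the Claim_ definition above) =====
theorem closest_extension_py_spec : Claim_equal_closest_extension_py := by
  intro ext candidates _
  unfold Spec_closest_extension_py closest_extension_py closest_extension_py_alt
  simp only [loopA_eq_loopB]
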